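-- pv_equiv track=rewrite | github.com/jonusHK/algorithm_data_structure | practice/practice_35.py | solution
-- ===== SOURCE A (Python) =====
-- def solution(s):
--     open_str = '({['
--     close_str = ')}]'
--     count = [0, 0, 0]
--
--     for sign in s:
--         for i in range(3):
--             if sign == open_str[i]:
--                 count[i] += 1
--             if sign == close_str[i]:
--                 count[i] -= 1
--             if count[i] < 0:
--                 return False
--
--     return not any(count)
-- ===== SOURCE B (Python) =====
-- def balanced(s, open_ch, close_ch):
--     bal = 0
--     for ch in s:
--         bal += (ch == open_ch) - (ch == close_ch)
--         if bal < 0: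
--             return False
--     return bal == 0
--
--
-- def solution(s):
--     return all(balanced(s, o, c) for o, c in zip('({[', ')}]'))
-- ===== Notes on version B (the rewrite author's own statement) =====
-- stated objective: simpler
-- what changed: Replaces the single interleaved pass maintaining a 3-element count list with three independent short-circuiting per-bracket-type scans via a small balanced(s, open, close) helper.
import Mathlib
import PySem

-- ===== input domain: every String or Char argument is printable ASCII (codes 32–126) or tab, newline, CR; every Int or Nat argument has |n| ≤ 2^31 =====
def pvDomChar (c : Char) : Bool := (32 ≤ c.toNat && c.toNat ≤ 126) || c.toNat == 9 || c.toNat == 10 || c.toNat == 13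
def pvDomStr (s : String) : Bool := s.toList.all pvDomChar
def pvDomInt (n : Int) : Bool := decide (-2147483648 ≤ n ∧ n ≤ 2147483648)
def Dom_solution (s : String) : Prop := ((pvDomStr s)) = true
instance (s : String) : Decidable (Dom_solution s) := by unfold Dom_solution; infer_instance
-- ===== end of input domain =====

-- B replaces A's single interleaved pass over a 3-element count list with three
-- independent per-bracket-type scans (objective: simpler decomposition).

-- ===== PORT A =====
-- inner 'for i in range(3)' loop body; 'none' = early 'return False'
def solutionInner (sign : Char) : List Nat → List Int → Option (List Int)
  | [], count => some count
  | i :: is, count =>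
    -- open_str[i] / close_str[i]: i ∈ range(3) is always in range, getD is exact here
    let count := if sign == "({[".toList.getD i ' ' then count.set i (count.getD i 0 + 1) else count
    let count := if sign == ")}]".toList.getD i ' ' then count.set i (count.getD i 0 - 1) else count
    if count.getD i 0 < 0 then none else solutionInner sign is count

-- outer 'for sign in s' loop; 'not any(count)' = all entries zero
def solutionLoop : List Char → List Int → Bool
  | [], count => !(count.any (fun c => c != 0))
  | sign :: rest, count =>
    match solutionInner sign [0, 1, 2] count with
    | none => false
    | some count' => solutionLoop rest count'

def solution (s : String) : Bool := solutionLoop s.toList [0, 0, 0]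

-- ===== PORT B =====
def balanced : List Char → Char → Char → Int → Bool
  | [], _, _, bal => bal == 0
  | ch :: rest, o, c, bal =>
    let bal := bal + (if ch == o then (1 : Int) else 0) - (if ch == c then (1 : Int) else 0)
    if bal < 0 then false else balanced rest o c bal

def solution_alt (s : String) : Bool :=
  [('(', ')'), ('{', '}'), ('[', ']')].all (fun p => balanced s.toList p.1 p.2 0)

-- ===== PRECONDITION & SPEC =====
def Spec_solution (s : String) (out : Bool) : Prop := out = solution_alt s
instance (s : String) (out : Bool) : Decidable (Spec_solution s out) := by unfold Spec_solution; infer_instance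

-- ===== CLAIM (what is proved, stated in full; the proofs are below) =====
def Claim_equal_solution : Prop := ∀ (s : String), Dom_solution s → Spec_solution s (solution s)

-- ===== LEMMAS AND PROOFS =====

def stepB (ch o c : Char) (bal : Int) : Int :=
  bal + (if ch == o then (1 : Int) else 0) - (if ch == c then (1 : Int) else 0)

lemma balanced_cons (ch : Char) (rest : List Char) (o c : Char) (bal : Int) :
    balanced (ch :: rest) o c bal =
      (if stepB ch o c bal < 0 then false else balanced rest o c (stepB ch o c bal)) := by
  simp [balanced, stepB]

lemma inner_eval (sign : Char) (a b c : Int) :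
    solutionInner sign [0, 1, 2] [a, b, c] =
      (if stepB sign '(' ')' a < 0 then none
       else if stepB sign '{' '}' b < 0 then none
       else if stepB sign '[' ']' c < 0 then none
       else some [stepB sign '(' ')' a, stepB sign '{' '}' b, stepB sign '[' ']' c]) := by
  simp only [solutionInner, List.getD, stepB]
  by_cases h1 : sign = '(' <;> by_cases h2 : sign = ')' <;>
    by_cases h3 : sign = '{' <;> by_cases h4 : sign = '}' <;>
    by_cases h5 : sign = '[' <;> by_cases h6 : sign = ']' <;>
    simp_all [List.set]

lemma main_lemma : ∀ (l : List Char) (a b c : Int), 0 ≤ a → 0 ≤ b → 0 ≤ c →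
    solutionLoop l [a, b, c] =
      (balanced l '(' ')' a && balanced l '{' '}' b && balanced l '[' ']' c) := by
  intro l
  induction l with
  | nil =>
    intro a b c _ _ _
    simp only [solutionLoop, balanced, List.any]
    by_cases h1 : a = 0 <;> by_cases h2 : b = 0 <;> by_cases h3 : c = 0 <;> simp_all [bne, BEq.beq]
  | cons ch rest ih =>
    intro a b c ha hb hc
    rw [solutionLoop, inner_eval, balanced_cons, balanced_cons, balanced_cons]
    by_cases h1 : stepB ch '(' ')' a < 0 <;>
      by_cases h2 : stepB ch '{' '}' b < 0 <;>
      by_cases h3 : stepB ch '[' ']' c < 0 <;>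
      simp [h1, h2, h3]
    exact ih _ _ _ (by omega) (by omega) (by omega)

lemma alt_eq (s : String) :
    solution_alt s =
      (balanced s.toList '(' ')' 0 && balanced s.toList '{' '}' 0 && balanced s.toList '[' ']' 0) := by
  simp [solution_alt, Bool.and_assoc]

-- ===== VERDICT (by name: the statement is the Claim_ definition above) =====
theorem solution_spec : Claim_equal_solution := by
  intro s _
  unfold Spec_solution solution
  rw [alt_eq, main_lemma] <;> norm_num
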